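-- pv_equiv track=rewrite | github.com/tungnkhust/Information-Extraction | src/utils/utils.py | update_word_index_entity
-- ===== SOURCE A (Python) =====
-- def update_word_index_entity(entity, text):
--     pre_start_token = text[:entity["start"]].strip(" ").split(" ")
--     pre_start_token = [token for token in pre_start_token if token != '']
--     pre_end_token = text[:entity["end"]].strip(" ").split(" ")
--     pre_end_token = [token for token in pre_end_token if token != '']
--
--     start_token = len(pre_start_token)
--     end_token = len(pre_end_token)
--
--     entity["start_token"] = start_token
--     entity["end_token"] = end_token
--
--     return entity
-- ===== SOURCE B (Python) =====
-- def update_word_index_entity(entity, text):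
--     # One-pass run counter instead of strip/split/filter: a word starts where a
--     # non-space character follows a space (or the start of the prefix).
--     def count_words(prefix):
--         count = 0
--         prev = ' '
--         for c in prefix:
--             if c != ' ' and prev == ' ':
--                 count += 1
--             prev = c
--         return count
--
--     start_token = count_words(text[:entity["start"]])
--     end_token = count_words(text[:entity["end"]])
--
--     entity["start_token"] = start_token
--     entity["end_token"] = end_token
--
--     return entity
-- ===== Notes on version B (the rewrite author's own statement) =====
-- stated objective: simpler
-- what changed: Replaces strip(' ')/split(' ')/filter-nonempty list building with a single character scan that counts word starts (a non-space preceded by a space or the prefix start), no intermediate lists.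
import Mathlib
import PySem

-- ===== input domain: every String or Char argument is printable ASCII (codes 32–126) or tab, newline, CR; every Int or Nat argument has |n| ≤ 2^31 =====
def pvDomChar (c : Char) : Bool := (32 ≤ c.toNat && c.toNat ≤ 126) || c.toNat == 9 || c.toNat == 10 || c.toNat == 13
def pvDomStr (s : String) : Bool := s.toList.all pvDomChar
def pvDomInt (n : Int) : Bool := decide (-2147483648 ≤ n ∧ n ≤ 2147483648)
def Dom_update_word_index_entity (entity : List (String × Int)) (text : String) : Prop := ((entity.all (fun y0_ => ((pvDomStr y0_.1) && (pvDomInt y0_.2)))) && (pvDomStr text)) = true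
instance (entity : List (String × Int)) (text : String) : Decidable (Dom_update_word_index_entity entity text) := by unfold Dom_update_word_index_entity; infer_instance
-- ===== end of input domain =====

-- B replaces A's strip/split/filter token-list construction by a single fold over the
-- prefix that counts word starts (objective: simpler; return-value equivalence — both
-- mutate the entity dict in place in Python the same way).


-- ===== PORT A =====
def update_word_index_entity (entity : List (String × Int)) (text : String) : List (String × Int) :=
  let d := PySem.Dict.ofList entity
  match d.get? "start", d.get? "end" with
  | some s, some e =>
      let pre_start_token := PySem.Chars.splitOn (PySem.Chars.stripChars (PySem.List.slice text.toList none (some s)) [' ']) [' ']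
      let pre_start_token := pre_start_token.filter (fun token => token ≠ [])
      let pre_end_token := PySem.Chars.splitOn (PySem.Chars.stripChars (PySem.List.slice text.toList none (some e)) [' ']) [' ']
      let pre_end_token := pre_end_token.filter (fun token => token ≠ [])
      let start_token : Int := pre_start_token.length
      let end_token : Int := pre_end_token.length
      ((d.insert "start_token" start_token).insert "end_token" end_token).items
  | _, _ => entity  -- KeyError in Python; excluded by Pre_

-- ===== PORT B =====
def pvCountWords (pre : List Char) : Int :=
  (pre.foldl (fun (st : Char × Int) c =>
    (c, if c ≠ ' ' ∧ st.1 = ' ' then st.2 + 1 else st.2)) (' ', 0)).2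

def update_word_index_entity_alt (entity : List (String × Int)) (text : String) : List (String × Int) :=
  let d := PySem.Dict.ofList entity
  ((d.get? "start").bind fun s => (d.get? "end").map fun e =>
      let start_token := pvCountWords (PySem.List.slice text.toList none (some s))
      let end_token := pvCountWords (PySem.List.slice text.toList none (some e))
      ((d.insert "start_token" start_token).insert "end_token" end_token).items).getD
    entity  -- KeyError in Python; excluded by Pre_

-- ===== PRECONDITION & SPEC =====
-- Pre_ excludes exactly the inputs where Python A raises KeyError: the entity dict must have the keys "start" and "end".
def Pre_update_word_index_entity (entity : List (String × Int)) (text : String) : Prop :=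
  (PySem.Dict.ofList entity).contains "start" = true ∧ (PySem.Dict.ofList entity).contains "end" = true
instance (entity : List (String × Int)) (text : String) : Decidable (Pre_update_word_index_entity entity text) := by unfold Pre_update_word_index_entity; infer_instance

def pvWitness_update_word_index_entity : (List (String × Int)) × String := ([("start", 1), ("end", 4)], "ab cd e")

def Spec_update_word_index_entity (entity : List (String × Int)) (text : String) (out : List (String × Int)) : Prop := out = update_word_index_entity_alt entity text
instance (entity : List (String × Int)) (text : String) (out : List (String × Int)) : Decidable (Spec_update_word_index_entity entity text out) := by unfold Spec_update_word_index_entity; infer_instance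

-- ===== CLAIM (what is proved, stated in full; the proofs are below) =====
def Claim_equal_update_word_index_entity : Prop := ∀ (entity : List (String × Int)) (text : String), Dom_update_word_index_entity entity text → Pre_update_word_index_entity entity text → Spec_update_word_index_entity entity text (update_word_index_entity entity text)

-- ===== LEMMAS AND PROOFS =====

-- fuel-free version of PySem.Chars.splitOn.go for the single-space separator
def pvPieces : List Char → List Char → List (List Char) → List (List Char)
  | [], cur, acc => (cur.reverse :: acc).reverse
  | c :: rest, cur, acc =>
      if c = ' ' then pvPieces rest [] (cur.reverse :: acc) else pvPieces rest (c :: cur) acc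

-- number of maximal runs of non-space characters; the Bool says whether we are inside a run
def pvCnt : List Char → Bool → Nat
  | [], _ => 0
  | c :: cs, inw => if c = ' ' then pvCnt cs false else (if inw then 0 else 1) + pvCnt cs true

theorem pv_go_eq_pieces (fuel : Nat) (l cur : List Char) (acc : List (List Char))
    (h : l.length ≤ fuel) :
    PySem.Chars.splitOn.go [' '] fuel l cur acc = pvPieces l cur acc := by
  induction fuel generalizing l cur acc with
  | zero =>
      cases l with
      | nil => simp [PySem.Chars.splitOn.go, pvPieces]
      | cons c rest => simp at h
  | succ n ih =>
      cases l with
      | nil => simp [PySem.Chars.splitOn.go, pvPieces]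
      | cons c rest =>
          simp only [List.length_cons, Nat.succ_le_succ_iff] at h
          by_cases hc : c = ' '
          · subst hc
            rw [PySem.Chars.splitOn.go]
            simp [List.isPrefixOf, pvPieces, ih _ _ _ h]
          · rw [PySem.Chars.splitOn.go]
            have : ([' '] : List Char).isPrefixOf (c :: rest) = false := by
              simp [List.isPrefixOf]
              exact fun h' => hc h'.symm
            simp [this, pvPieces, hc, ih _ _ _ h]

theorem pv_countP_pieces (l : List Char) (cur : List Char) (acc : List (List Char)) :
    ((pvPieces l cur acc).filter (fun t => t ≠ [])).length
      = ((acc.filter (fun t => t ≠ [])).length + (if cur = [] then 0 else 1)) + pvCnt l (cur ≠ []) := by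
  induction l generalizing cur acc with
  | nil =>
      cases cur <;> simp [pvPieces, pvCnt, List.filter_reverse]
  | cons c rest ih =>
      by_cases hc : c = ' '
      · subst hc
        rw [pvPieces, if_pos rfl, ih]
        cases cur <;> simp [pvCnt]
      · rw [pvPieces, if_neg hc, ih]
        cases hcur : cur with
        | nil => simp [pvCnt, hc]; omega
        | cons d ds => simp [pvCnt, hc]

theorem pv_cnt_spaces : ∀ (r : List Char), (∀ c ∈ r, c = ' ') → ∀ b, pvCnt r b = 0
  | [], _, _ => by simp [pvCnt]
  | c :: cs, h, b => by
      have hc : c = ' ' := h c (by simp)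
      simp [pvCnt, hc, pv_cnt_spaces cs (fun x hx => h x (by simp [hx])) false]

theorem pv_cnt_append_spaces (l r : List Char) (h : ∀ c ∈ r, c = ' ') (b : Bool) :
    pvCnt (l ++ r) b = pvCnt l b := by
  induction l generalizing b with
  | nil => simpa [pvCnt] using pv_cnt_spaces r h b
  | cons c cs ih => by_cases hc : c = ' ' <;> simp [pvCnt, hc, ih]

theorem pv_cnt_dropWhile (l : List Char) (p : Char → Bool) (hp : ∀ c, p c = true ↔ c = ' ') :
    pvCnt (l.dropWhile p) false = pvCnt l false := by
  induction l with
  | nil => simp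
  | cons c cs ih =>
      by_cases hc : c = ' '
      · subst hc
        rw [List.dropWhile_cons_of_pos ((hp ' ').mpr rfl)]
        simp [pvCnt, ih]
      · rw [List.dropWhile_cons_of_neg (by simp [hp, hc])]

theorem pv_cnt_rstrip (m : List Char) (p : Char → Bool) (hp : ∀ c, p c = true ↔ c = ' ') :
    pvCnt ((m.reverse.dropWhile p).reverse) false = pvCnt m false := by
  conv_rhs => rw [show m = (m.reverse.dropWhile p).reverse ++ (m.reverse.takeWhile p).reverse by
    rw [← List.reverse_append, List.takeWhile_append_dropWhile, List.reverse_reverse]]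
  rw [pv_cnt_append_spaces]
  intro c hc
  rw [List.mem_reverse] at hc
  exact (hp c).mp (List.mem_takeWhile_imp hc)

-- A's strip/split/filter count equals the run count
theorem pv_A_count (cs : List Char) :
    (((PySem.Chars.splitOn (PySem.Chars.stripChars cs [' ']) [' ']).filter (fun t => t ≠ [])).length : Int)
      = (pvCnt cs false : Int) := by
  have hp : ∀ c : Char, (([' '] : List Char).contains c) = true ↔ c = ' ' := by
    intro c; simp [eq_comm]
  unfold PySem.Chars.splitOn PySem.Chars.stripChars
  rw [pv_go_eq_pieces _ _ _ _ (Nat.le_succ _), pv_countP_pieces]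
  simp only [if_true, show (decide ((([] : List Char) : List Char) ≠ [])) = false from rfl,
    List.filter_nil, List.length_nil, Nat.zero_add, Nat.add_zero]
  rw [pv_cnt_rstrip _ _ hp, pv_cnt_dropWhile _ _ hp]

-- B's fold equals the run count
theorem pv_B_fold (l : List Char) (p : Char) (k : Int) :
    (l.foldl (fun (st : Char × Int) c =>
      (c, if c ≠ ' ' ∧ st.1 = ' ' then st.2 + 1 else st.2)) (p, k)).2
      = k + (pvCnt l (p ≠ ' ') : Int) := by
  induction l generalizing p k with
  | nil => simp [pvCnt]
  | cons c cs ih =>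
      by_cases hc : c = ' '
      · subst hc
        by_cases hpz : p = ' ' <;> simp [List.foldl_cons, pvCnt, ih, hpz]
      · by_cases hpz : p = ' ' <;> simp [List.foldl_cons, pvCnt, ih, hpz, hc] <;> omega

theorem pv_count_eq (cs : List Char) :
    (((PySem.Chars.splitOn (PySem.Chars.stripChars cs [' ']) [' ']).filter (fun t => t ≠ [])).length : Int)
      = pvCountWords cs := by
  rw [pv_A_count]
  unfold pvCountWords
  rw [pv_B_fold]
  simp

-- ===== VERDICT (by name: the statement is the Claim_ definition above) =====
theorem update_word_index_entity_spec : Claim_equal_update_word_index_entity := by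
  intro entity text _ hpre
  unfold Spec_update_word_index_entity
  obtain ⟨h1, h2⟩ := hpre
  rw [PySem.Dict.contains_eq_isSome_get?] at h1 h2
  unfold update_word_index_entity update_word_index_entity_alt
  cases hs : (PySem.Dict.ofList entity).get? "start" with
  | none => rw [hs] at h1; simp at h1
  | some s =>
    cases he : (PySem.Dict.ofList entity).get? "end" with
    | none => rw [he] at h2; simp at h2
    | some e =>
      simp only [hs, he, Option.bind_some, Option.map_some, Option.getD_some, pv_count_eq]
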